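-- pv_equiv track=rewrite | github.com/marlowe518/Awesome-Differential-Privacy-and-Meachine-Learning | GNN/link_prediction_samll_dataset/seal_link_pred_for_small_data_with_dp.py | compute_max_terms_per_edge_for_path
-- ===== SOURCE A (Python) =====
-- import math
--
-- def compute_max_terms_per_edge_for_path(path_length, max_node_degree, lamda=1):
--     if path_length > 2:
--         hop = math.ceil((path_length - 1) / 2)
--         r = (path_length - 1) % 2
--         implicated_edges_incident_to_lower_node = 0
--         for i in range(hop - r):  # i=0,...,h-1-r
--             tail_node_num_of_q = 0
--             for j in range(i, 2 * hop):
--                 tail_node_num_of_q += max_node_degree ** j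
--             q_higher_order_neighbors_num = min(lamda * max_node_degree, tail_node_num_of_q)
--             tail_node_num_of_s = tail_node_num_of_q - max_node_degree ** i
--             s_higher_order_neighbors_num = min(lamda * max_node_degree, tail_node_num_of_s)
--             implicated_edges_incident_to_lower_node += max_node_degree ** i * (
--                     q_higher_order_neighbors_num + s_higher_order_neighbors_num)
--         tmp_1 = min((1 + lamda) * max_node_degree, max_node_degree ** hop)
--         implicated_edges_incident_to_high_order_node = (1 + r) * max_node_degree ** (hop - r) * tmp_1
--         edges_on_rings = 0
--         for i in range(1, hop - r + 1):
--             edges_on_rings += 2 * min(max_node_degree ** (hop + 1), max_node_degree ** i)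
--         all_implicated_edges = implicated_edges_incident_to_lower_node \
--                                + implicated_edges_incident_to_high_order_node \
--                                + edges_on_rings
--     elif path_length == 2:
--         all_implicated_edges = 2 * max_node_degree
--     else:
--         raise ValueError(f"not a valid path_length of {path_length}")
--     return all_implicated_edges
-- ===== SOURCE B (Python) =====
-- def compute_max_terms_per_edge_for_path(path_length, max_node_degree, lamda=1):
--     if path_length == 2:
--         return 2 * max_node_degree
--     if path_length < 2:
--         raise ValueError(f"not a valid path_length of {path_length}")
--     d = max_node_degree
--     hop = path_length // 2            # == math.ceil((path_length - 1) / 2)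
--     r = (path_length - 1) % 2
--     # all powers d**0 .. d**(2*hop-1) computed once, one multiplication each
--     pw = []
--     p = 1
--     for _ in range(2 * hop):
--         pw.append(p)
--         p *= d
--     cap = lamda * d
--     suffix = sum(pw)                  # running suffix sum of the power table
--     lower = 0
--     for q in pw[:hop - r]:            # q == d**i, suffix == sum(d**j for j in [i, 2*hop))
--         lower += q * (min(cap, suffix) + min(cap, suffix - q))
--         suffix -= q
--     high = (1 + r) * pw[hop - r] * min((1 + lamda) * d, pw[hop])
--     rings = 2 * sum(min(pw[hop] * d, q) for q in pw[1:hop - r + 1])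
--     return lower + high + rings
-- ===== Notes on version B (the rewrite author's own statement) =====
-- stated objective: faster
-- what changed: Replaces A's O(hop^2) inner re-summation of degree powers (one fresh geometric sum per outer iteration, each power recomputed with **) by a power table built with one multiplication per entry and a running suffix sum, so the whole computation is one O(hop) pass.
import Mathlib
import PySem

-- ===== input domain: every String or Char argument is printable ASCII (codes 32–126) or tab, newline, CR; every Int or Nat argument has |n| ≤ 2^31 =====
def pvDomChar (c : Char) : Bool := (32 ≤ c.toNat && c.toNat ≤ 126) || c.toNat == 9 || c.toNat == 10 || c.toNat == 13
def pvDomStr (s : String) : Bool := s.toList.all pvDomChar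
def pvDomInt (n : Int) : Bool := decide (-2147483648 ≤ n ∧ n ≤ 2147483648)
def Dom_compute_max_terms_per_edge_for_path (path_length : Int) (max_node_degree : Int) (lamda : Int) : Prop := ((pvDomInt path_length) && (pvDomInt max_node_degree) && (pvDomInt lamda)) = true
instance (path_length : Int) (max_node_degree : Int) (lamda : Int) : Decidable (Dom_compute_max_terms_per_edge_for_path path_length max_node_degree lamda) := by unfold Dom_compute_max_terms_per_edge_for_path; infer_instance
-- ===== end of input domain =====

-- B replaces A's quadratic re-summation of degree powers by a power table and a running
-- suffix sum, one O(hop) pass (objective: faster, asymptotic O(hop^2) → O(hop)).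

-- ===== PORT A =====
-- literal port of Source A; math.ceil((path_length-1)/2) is ported as the exact integer
-- ceiling -((-(path_length-1)) // 2), which equals the float ceil for |path_length| ≤ 2^31;
-- exponents j in the loops are always ≥ 0, so `** j` is ported as `^ j.toNat`.
def compute_max_terms_per_edge_for_path (path_length : Int) (max_node_degree : Int) (lamda : Int) : Int :=
  if path_length > 2 then
    let hop : Int := -(PySem.Int.floordiv (-(path_length - 1)) 2)
    let r : Int := PySem.Int.mod (path_length - 1) 2
    let implicated_edges_incident_to_lower_node :=
      (PySem.List.pyRange 0 (hop - r) 1).foldl (fun acc i =>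
        let tail_node_num_of_q :=
          (PySem.List.pyRange i (2 * hop) 1).foldl
            (fun t j => t + max_node_degree ^ j.toNat) 0
        let q_higher_order_neighbors_num := min (lamda * max_node_degree) tail_node_num_of_q
        let tail_node_num_of_s := tail_node_num_of_q - max_node_degree ^ i.toNat
        let s_higher_order_neighbors_num := min (lamda * max_node_degree) tail_node_num_of_s
        acc + max_node_degree ^ i.toNat *
          (q_higher_order_neighbors_num + s_higher_order_neighbors_num)) 0
    let tmp_1 := min ((1 + lamda) * max_node_degree) (max_node_degree ^ hop.toNat)
    let implicated_edges_incident_to_high_order_node :=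
      (1 + r) * max_node_degree ^ (hop - r).toNat * tmp_1
    let edges_on_rings :=
      (PySem.List.pyRange 1 (hop - r + 1) 1).foldl (fun acc i =>
        acc + 2 * min (max_node_degree ^ (hop + 1).toNat) (max_node_degree ^ i.toNat)) 0
    implicated_edges_incident_to_lower_node
      + implicated_edges_incident_to_high_order_node
      + edges_on_rings
  else if path_length == 2 then 2 * max_node_degree
  else 0  -- Python raises ValueError here; excluded by Pre_

-- ===== PORT B =====
-- literal port of Source B (power table + running suffix sum)
def compute_max_terms_per_edge_for_path_alt (path_length : Int) (max_node_degree : Int) (lamda : Int) : Int :=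
  if path_length == 2 then 2 * max_node_degree
  else if path_length < 2 then 0  -- Python raises ValueError here; excluded by Pre_
  else
    let d := max_node_degree
    let hop := PySem.Int.floordiv path_length 2
    let r := PySem.Int.mod (path_length - 1) 2
    -- pw = []; p = 1; for _ in range(2*hop): pw.append(p); p *= d
    let pw := ((PySem.List.pyRange 0 (2 * hop) 1).foldl
      (fun (st : List Int × Int) _ => (st.1 ++ [st.2], st.2 * d)) ([], 1)).1
    let cap := lamda * d
    let suffix := pw.sum
    -- for q in pw[:hop - r]: lower += q * (min(cap, suffix) + min(cap, suffix - q)); suffix -= q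
    let res := (PySem.List.slice pw none (some (hop - r))).foldl
      (fun (st : Int × Int) q => (st.1 + q * (min cap st.2 + min cap (st.2 - q)), st.2 - q))
      (0, suffix)
    let lower := res.1
    let high := (1 + r) * PySem.List.pyGetD pw (hop - r) 0 *
      min ((1 + lamda) * d) (PySem.List.pyGetD pw hop 0)
    let rings := 2 * ((PySem.List.slice pw (some 1) (some (hop - r + 1))).map
      (fun q => min (PySem.List.pyGetD pw hop 0 * d) q)).sum
    lower + high + rings

-- ===== PRECONDITION & SPEC =====
-- Pre_ excludes exactly path_length < 2, where Python A raises ValueError.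
def Pre_compute_max_terms_per_edge_for_path (path_length : Int) (max_node_degree : Int) (lamda : Int) : Prop := 2 ≤ path_length
instance (path_length : Int) (max_node_degree : Int) (lamda : Int) : Decidable (Pre_compute_max_terms_per_edge_for_path path_length max_node_degree lamda) := by unfold Pre_compute_max_terms_per_edge_for_path; infer_instance
def pvWitness_compute_max_terms_per_edge_for_path : Int × Int × Int := (7, 3, 2)

def Spec_compute_max_terms_per_edge_for_path (path_length : Int) (max_node_degree : Int) (lamda : Int) (out : Int) : Prop := out = compute_max_terms_per_edge_for_path_alt path_length max_node_degree lamda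
instance (path_length : Int) (max_node_degree : Int) (lamda : Int) (out : Int) : Decidable (Spec_compute_max_terms_per_edge_for_path path_length max_node_degree lamda out) := by unfold Spec_compute_max_terms_per_edge_for_path; infer_instance

-- ===== CLAIM (what is proved, stated in full; the proofs are below) =====
def Claim_equal_compute_max_terms_per_edge_for_path : Prop := ∀ (path_length : Int) (max_node_degree : Int) (lamda : Int), Dom_compute_max_terms_per_edge_for_path path_length max_node_degree lamda → Pre_compute_max_terms_per_edge_for_path path_length max_node_degree lamda → Spec_compute_max_terms_per_edge_for_path path_length max_node_degree lamda (compute_max_terms_per_edge_for_path path_length max_node_degree lamda)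

-- ===== LEMMAS AND PROOFS =====

-- tail sum of degree powers: T d n i = ∑_{j=i}^{n-1} d^j
def pvT (d : Int) (n i : Nat) : Int := ∑ j ∈ Finset.Ico i n, d ^ j

-- a fold over range(a, b) accumulating `acc + f i` is an Ico-sum
lemma pv_foldA (f : Int → Int) (a b : Nat) :
    (PySem.List.pyRange (a : Int) (b : Int) 1).foldl (fun acc i => acc + f i) 0
      = ∑ i ∈ Finset.Ico a b, f (i : Int) := by
  induction b with
  | zero =>
    have : PySem.List.pyRange (a : Int) 0 1 = [] := by
      simp [PySem.List.pyRange]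
    simp [this]
  | succ b ih =>
    by_cases hab : a ≤ b
    · have h1 : ((b : Int) + 1) = ((b + 1 : Nat) : Int) := by push_cast; ring
      rw [← h1, PySem.List.pyRange_one_succ_right (by exact_mod_cast hab),
        List.foldl_append, ih, Finset.sum_Ico_succ_top hab]
      simp
    · have hba : (b + 1 : Nat) ≤ a := by omega
      have : PySem.List.pyRange (a : Int) ((b + 1 : Nat) : Int) 1 = [] := by
        simp [PySem.List.pyRange]; omega
      rw [this]
      simp [Finset.Ico_eq_empty_of_le hba]

-- B's power-table build loop produces [d^0, …, d^(n-1)] and the running power d^n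
lemma pv_build (d : Int) (n : Nat) :
    ((PySem.List.pyRange 0 (n : Int) 1).foldl
      (fun (st : List Int × Int) _ => (st.1 ++ [st.2], st.2 * d)) ([], 1))
      = ((List.range n).map (fun k => d ^ k), d ^ n) := by
  induction n with
  | zero => simp [PySem.List.pyRange]
  | succ n ih =>
    have h1 : ((n : Int) + 1) = ((n + 1 : Nat) : Int) := by push_cast; ring
    rw [← h1, PySem.List.pyRange_one_succ_right (by positivity), List.foldl_append, ih]
    simp [List.range_succ, pow_succ]

-- B's main loop invariant: after the first m table entries, the accumulator holds the
-- partial lower-edge sum and the suffix variable holds pvT d n m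
lemma pv_Bloop (d c : Int) (n m : Nat) (hmn : m ≤ n) :
    ((List.range m).map (fun k => d ^ k)).foldl
      (fun (st : Int × Int) q => (st.1 + q * (min c st.2 + min c (st.2 - q)), st.2 - q))
      (0, pvT d n 0)
    = (∑ i ∈ Finset.range m, d ^ i * (min c (pvT d n i) + min c (pvT d n i - d ^ i)),
       pvT d n m) := by
  induction m with
  | zero => simp
  | succ m ih =>
    have hm : m ≤ n := by omega
    have hT : pvT d n m - d ^ m = pvT d n (m + 1) := by
      have := Finset.sum_eq_sum_Ico_succ_bot (show m < n by omega) (fun j => d ^ j)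
      simp only [pvT]
      omega
    rw [List.range_succ, List.map_append, List.foldl_append, ih hm]
    simp [Finset.sum_range_succ, hT]

-- fold over range(b) (resp. range(1, b)) as a Finset sum, cast-free endpoints
lemma pv_foldA0 (f : Int → Int) (b : Nat) :
    (PySem.List.pyRange 0 (b : Int) 1).foldl (fun acc i => acc + f i) 0
      = ∑ i ∈ Finset.range b, f (i : Int) := by
  have h0 := pv_foldA f 0 b
  rw [Nat.cast_zero] at h0
  rw [Finset.range_eq_Ico]
  exact h0

lemma pv_foldA1 (f : Int → Int) (b : Nat) :
    (PySem.List.pyRange 1 (b : Int) 1).foldl (fun acc i => acc + f i) 0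
      = ∑ i ∈ Finset.Ico 1 b, f (i : Int) := by
  have h1 := pv_foldA f 1 b
  rw [Nat.cast_one] at h1
  exact h1

lemma pv_slice1 {α : Type} (xs : List α) (b : Nat) :
    PySem.List.slice xs (some 1) (some (b : Int)) = (xs.drop 1).take (b - 1) := by
  have := PySem.List.slice_natCast xs 1 b
  simpa using this

lemma pv_drop1_range (n : Nat) :
    (List.range n).drop 1 = (List.range (n - 1)).map Nat.succ := by
  cases n with
  | zero => simp
  | succ n => rw [List.range_succ_eq_map]; simp

lemma pv_getD_pw (d : Int) (n k : Nat) (hk : k < n) :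
    PySem.List.pyGetD ((List.range n).map (fun j => d ^ j)) (k : Int) 0 = d ^ k := by
  rw [PySem.List.pyGetD_natCast, PySem.List.getD_map_range _ _ _ _ hk]

-- ===== VERDICT (by name: the statement is the Claim_ definition above) =====
theorem compute_max_terms_per_edge_for_path_spec : Claim_equal_compute_max_terms_per_edge_for_path := by
  intro p d l _ hpre
  unfold Spec_compute_max_terms_per_edge_for_path
  unfold Pre_compute_max_terms_per_edge_for_path at hpre
  by_cases hp2 : p = 2
  · subst hp2
    simp [compute_max_terms_per_edge_for_path, compute_max_terms_per_edge_for_path_alt]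
  · have hp3 : 3 ≤ p := by omega
    have hA : p > 2 := by omega
    simp only [compute_max_terms_per_edge_for_path, compute_max_terms_per_edge_for_path_alt]
    rw [if_pos hA, if_neg (show ¬((p == 2) = true) by simpa using hp2),
        if_neg (show ¬(p < 2) by omega)]
    rw [PySem.Int.floordiv_eq_ediv_of_pos (by norm_num : (0:Int) < 2),
        PySem.Int.floordiv_eq_ediv_of_pos (by norm_num : (0:Int) < 2),
        PySem.Int.mod_eq_emod_of_pos (by norm_num : (0:Int) < 2)]
    obtain ⟨h, hh⟩ : ∃ h : Nat, p / 2 = (h : Int) := ⟨(p / 2).toNat, by omega⟩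
    obtain ⟨r, hr⟩ : ∃ r : Nat, (p - 1) % 2 = (r : Int) := ⟨((p - 1) % 2).toNat, by omega⟩
    have hhop : -((-(p - 1)) / 2) = (h : Int) := by omega
    have hr1 : r ≤ 1 := by omega
    have hh1 : 1 ≤ h := by omega
    have hrh : r + 1 ≤ h := by omega
    rw [hhop, hh, hr]
    have e1 : (h : Int) - r = ((h - r : Nat) : Int) := by omega
    have e2 : 2 * (h : Int) = ((2 * h : Nat) : Int) := by omega
    have e3 : ((h - r : Nat) : Int) + 1 = ((h - r + 1 : Nat) : Int) := by omega
    rw [e1, e2, e3]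
    -- B side: power table, suffix-sum loop, lookups, ring slice
    rw [pv_build]
    simp only
    have hsum : ((List.range (2 * h)).map (fun k => d ^ k)).sum = pvT d (2 * h) 0 := by
      rw [pvT, ← Finset.range_eq_Ico]; rfl
    have hs := PySem.List.slice_to ((List.range (2 * h)).map (fun k => d ^ k))
      (show (0 : Int) ≤ ((h - r : Nat) : Int) by omega)
    rw [hs, pv_slice1]
    simp only [Int.toNat_natCast, Nat.add_sub_cancel]
    rw [← List.map_take, List.take_range, Nat.min_eq_left (by omega), hsum,
        pv_Bloop d (l * d) (2 * h) (h - r) (by omega)]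
    simp only
    have g1 : PySem.List.pyGetD ((List.range (2 * h)).map (fun k => d ^ k)) ((h - r : Nat) : Int) 0 = d ^ (h - r) :=
      pv_getD_pw d (2 * h) (h - r) (by omega)
    have g2 : PySem.List.pyGetD ((List.range (2 * h)).map (fun k => d ^ k)) ((h : Nat) : Int) 0 = d ^ h :=
      pv_getD_pw d (2 * h) h (by omega)
    rw [g1, g2]
    rw [← List.map_drop, pv_drop1_range, ← List.map_take, ← List.map_take, List.take_range,
        Nat.min_eq_left (by omega), List.map_map, List.map_map]
    -- A side: loops to Finset sums
    rw [pv_foldA0, pv_foldA1]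
    simp only [pv_foldA, Int.toNat_natCast]
    have e6 : ((h : Int) + 1).toNat = h + 1 := by omega
    rw [e6]
    -- lower-edge sums and the high-order term are now syntactically equal; rings remain
    congr 1
    have hrsum : (List.map (((fun q => min (d ^ h * d) q) ∘ fun x => d ^ x) ∘ Nat.succ)
        (List.range (h - r))).sum
        = ∑ k ∈ Finset.range (h - r), min (d ^ h * d) (d ^ (k + 1)) := rfl
    rw [hrsum, Finset.sum_Ico_eq_sum_range, Finset.mul_sum]
    simp only [Nat.add_sub_cancel]
    apply Finset.sum_congr rfl
    intro k _
    rw [pow_succ, Nat.add_comm 1 k]
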